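-- pv_equiv track=rewrite | github.com/dombroks/Daily-Coding-Problems | Facebook_Problems/Facebook_Problem_10.py | can_be_partitioned
-- ===== SOURCE A (Python) =====
-- def can_be_partitioned(multiset):
--   multiset.sort()
--   index = 1
--   while(index < len(multiset)-1):
--     n = sum(multiset[-index:])
--     for j in range(len(multiset)):
--       if sum(multiset[:j]) == n :
--         return True
--     if index == len(multiset):
--       break
--     index+=1
--
--   return False
-- ===== SOURCE B (Python) =====
-- def can_be_partitioned(multiset):
--     # prefix-sum set + incremental suffix scan; O(n log n) vs A's O(n^3)
--     multiset.sort()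
--     n = len(multiset)
--     prefix_sums = set()
--     acc = 0
--     for j in range(n):
--         prefix_sums.add(acc)
--         acc += multiset[j]
--     suf = 0
--     for index in range(1, n - 1):
--         suf += multiset[n - index]
--         if suf in prefix_sums:
--             return True
--     return False
-- ===== Notes on version B (the rewrite author's own statement) =====
-- stated objective: faster
-- what changed: Replaces A's nested rescans (a fresh suffix-slice sum and a fresh prefix-slice sum for every probe) by one pass building the set of prefix sums of the sorted list and one incremental suffix-sum scan with a set membership test.
import Mathlib
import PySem

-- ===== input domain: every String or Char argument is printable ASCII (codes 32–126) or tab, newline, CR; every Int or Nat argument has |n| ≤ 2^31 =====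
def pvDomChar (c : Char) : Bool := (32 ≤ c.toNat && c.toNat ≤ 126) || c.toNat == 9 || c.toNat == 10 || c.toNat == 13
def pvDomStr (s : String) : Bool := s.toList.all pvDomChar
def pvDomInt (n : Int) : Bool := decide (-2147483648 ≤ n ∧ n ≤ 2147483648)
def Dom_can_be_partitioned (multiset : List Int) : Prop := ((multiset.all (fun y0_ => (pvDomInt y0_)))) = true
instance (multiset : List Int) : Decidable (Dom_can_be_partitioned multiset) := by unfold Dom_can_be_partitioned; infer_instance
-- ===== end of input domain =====

-- B replaces A's cubic rescan (a fresh suffix sum and a fresh prefix sum per probe) by one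
-- prefix-sum set and one incremental suffix scan (objective: faster). Both A and the Python B
-- sort the argument list in place; the equivalence proved here is about the return value.

-- ===== PORT A =====
-- the inner 'for j in range(len(multiset)): if sum(multiset[:j]) == n: return True'
def pvAInner (s : List Int) (n : Int) : Bool :=
  (List.range s.length).any (fun j => decide ((s.take j).sum = n))

-- the 'while index < len(multiset)-1' loop (index ≥ 1 throughout; Nat subtraction agrees
-- with Python's len-1 here since the test is false either way for len = 0)
def pvALoop (s : List Int) (index : Nat) : Bool :=
  if index < s.length - 1 then
    let n := (PySem.List.slice s (some (-(index : Int))) none).sum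
    if pvAInner s n then true
    else if index = s.length then false
    else pvALoop s (index + 1)
  else false
termination_by s.length - 1 - index

def can_be_partitioned (multiset : List Int) : Bool :=
  pvALoop (PySem.List.sorted multiset (fun x => x) false) 1

-- ===== PORT B =====
-- 'for j in range(n): prefix_sums.add(acc); acc += multiset[j]'
def pvBPrefix (s : List Int) : PySem.Set Int × Int :=
  s.foldl (fun p x => (PySem.Set.add p.1 p.2, p.2 + x)) (PySem.Set.empty, 0)

-- 'for index in range(1, n-1): suf += multiset[n-index]; if suf in prefix_sums: return True'
def pvBLoop (s : List Int) (pset : PySem.Set Int) (suf : Int) (index : Nat) : Bool :=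
  if index < s.length - 1 then
    let suf' := suf + s.getD (s.length - index) 0
    if pset.contains suf' then true
    else pvBLoop s pset suf' (index + 1)
  else false
termination_by s.length - 1 - index

def can_be_partitioned_alt (multiset : List Int) : Bool :=
  let s := PySem.List.sorted multiset (fun x => x) false
  pvBLoop s (pvBPrefix s).1 0 1

-- ===== PRECONDITION & SPEC =====
def Spec_can_be_partitioned (multiset : List Int) (out : Bool) : Prop := out = can_be_partitioned_alt multiset
instance (multiset : List Int) (out : Bool) : Decidable (Spec_can_be_partitioned multiset out) := by unfold Spec_can_be_partitioned; infer_instance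

-- ===== CLAIM (what is proved, stated in full; the proofs are below) =====
def Claim_equal_can_be_partitioned : Prop := ∀ (multiset : List Int), Dom_can_be_partitioned multiset → Spec_can_be_partitioned multiset (can_be_partitioned multiset)

-- ===== LEMMAS AND PROOFS =====

-- the prefix-sum set of B holds exactly the sums of the proper-or-empty prefixes of s
theorem pvBPrefix_fst_mem (s : List Int) :
    ∀ (p : PySem.Set Int) (acc x : Int),
      x ∈ (s.foldl (fun p x => (PySem.Set.add p.1 p.2, p.2 + x)) (p, acc)).1 ↔
        x ∈ p ∨ ∃ j < s.length, x = acc + (s.take j).sum := by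
  induction s with
  | nil => simp
  | cons a t ih =>
    intro p acc x
    simp only [List.foldl_cons, ih, PySem.Set.mem_add]
    constructor
    · rintro ((h | h) | ⟨j, hj, rfl⟩)
      · exact Or.inl h
      · exact Or.inr ⟨0, by simp, by simpa using h⟩
      · exact Or.inr ⟨j + 1, by simpa using hj, by simp [List.take_succ_cons]; ring⟩
    · rintro (h | ⟨j, hj, rfl⟩)
      · exact Or.inl (Or.inl h)
      · cases j with
        | zero => exact Or.inl (Or.inr (by simp))
        | succ j => exact Or.inr ⟨j, by simpa using hj, by simp [List.take_succ_cons]; ring⟩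

-- A's inner scan and B's set lookup decide the same proposition
theorem pvInner_eq_contains (s : List Int) (v : Int) :
    pvAInner s v = (pvBPrefix s).1.contains v := by
  rw [Bool.eq_iff_iff]
  unfold pvAInner pvBPrefix PySem.Set.contains
  rw [List.any_eq_true, List.contains_iff_mem, pvBPrefix_fst_mem s PySem.Set.empty 0 v]
  constructor
  · rintro ⟨j, hj, hval⟩
    rw [List.mem_range] at hj
    rw [decide_eq_true_iff] at hval
    exact Or.inr ⟨j, hj, by simp [hval]⟩
  · rintro (h | ⟨j, hj, rfl⟩)
    · simp [PySem.Set.empty] at h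
    · exact ⟨j, List.mem_range.2 hj, by simp⟩

-- one suffix-sum step: dropping one index earlier adds the element at that index
theorem pvDrop_sum_step (s : List Int) (i : Nat) (h : i < s.length) :
    (s.drop i).sum = s.getD i 0 + (s.drop (i + 1)).sum := by
  rw [List.getD_eq_getElem _ _ h, ← List.sum_cons, List.getElem_cons_drop]

-- the two loops agree whenever B's accumulator equals the running suffix sum
theorem pvLoop_eq (s : List Int) :
    ∀ (fuel index : Nat), s.length - 1 - index ≤ fuel → 1 ≤ index →
      pvALoop s index = pvBLoop s (pvBPrefix s).1 ((s.drop (s.length - (index - 1))).sum) index := by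
  intro fuel
  induction fuel with
  | zero =>
    intro index hf _
    unfold pvALoop pvBLoop
    have : ¬ index < s.length - 1 := by omega
    simp [this]
  | succ fuel ih =>
    intro index hf h1
    unfold pvALoop pvBLoop
    by_cases hlt : index < s.length - 1
    · simp only [hlt, if_true]
      have hidx : s.length - index < s.length := by omega
      have hsuf : (s.drop (s.length - (index - 1))).sum + s.getD (s.length - index) 0
          = (s.drop (s.length - index)).sum := by
        rw [pvDrop_sum_step s (s.length - index) hidx]
        have : s.length - index + 1 = s.length - (index - 1) := by omega
        rw [this]; ring
      have hslice : (PySem.List.slice s (some (-(index : Int))) none).sum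
          = (s.drop (s.length - index)).sum := by
        rw [PySem.List.slice_from_neg_natCast s index (by omega)]
      rw [pvInner_eq_contains, hslice, hsuf]
      have hne : ¬ index = s.length := by omega
      have hrec := ih (index + 1) (by omega) (by omega)
      have hstep : index + 1 - 1 = index := by omega
      rw [hstep] at hrec
      simp [hne, hrec]
    · simp [hlt]

-- ===== VERDICT (by name: the statement is the Claim_ definition above) =====
theorem can_be_partitioned_spec : Claim_equal_can_be_partitioned := by
  intro multiset _
  unfold Spec_can_be_partitioned can_be_partitioned can_be_partitioned_alt
  set s := PySem.List.sorted multiset (fun x => x) false with hs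
  have := pvLoop_eq s (s.length - 1 - 1) 1 (le_refl _) (le_refl _)
  simpa using this
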